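-- pv_equiv track=rewrite | github.com/Minh-M80/Python | test1.py | longest_negative_subarrays
-- ===== SOURCE A (Python) =====
-- def longest_negative_subarrays(lst):
--     max_len = 0
--     current_len = 0
--     start_idx = -1
--     subarrays = []
--
--     for i, num in enumerate(lst):
--         if num < 0:
--             if current_len == 0:
--                 start_idx = i  # Đánh dấu vị trí bắt đầu của dãy âm hiện tại
--             current_len += 1
--         else:
--             if current_len > 0:
--                 # Khi gặp số không âm, kiểm tra và cập nhật danh sách dãy âm dài nhất
--                 if current_len > max_len:
--                     max_len = current_len
--                     subarrays = [lst[start_idx:start_idx + current_len]]  # Cập nhật dãy dài nhất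
--                 elif current_len == max_len:
--                     subarrays.append(lst[start_idx:start_idx + current_len])  # Thêm dãy có cùng độ dài
--             current_len = 0  # Đặt lại độ dài
--
--     # Xử lý dãy âm cuối cùng nếu mảng kết thúc bằng số âm
--     if current_len > 0:
--         if current_len > max_len:
--             max_len = current_len
--             subarrays = [lst[start_idx:start_idx + current_len]]
--         elif current_len == max_len:
--             subarrays.append(lst[start_idx:start_idx + current_len])
--
--     return subarrays
-- ===== SOURCE B (Python) =====
-- def longest_negative_subarrays(lst):
--     # Extract the maximal runs of consecutive negative numbers, then keep the longest ones.
--     runs = []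
--     i = 0
--     n = len(lst)
--     while i < n:
--         if lst[i] < 0:
--             j = i
--             while j < n and lst[j] < 0:
--                 j += 1
--             runs.append(lst[i:j])
--             i = j
--         else:
--             i += 1
--     m = max(map(len, runs), default=0)
--     return [r for r in runs if len(r) == m]
-- ===== Notes on version B (the rewrite author's own statement) =====
-- stated objective: idiomatic
-- what changed: B first extracts the maximal runs of consecutive negative numbers (an inner scan per run, like groupby), then computes the maximum run length and filters the runs by it, instead of A's single-pass state machine tracking max_len/current_len/start_idx and flushing index slices on the fly.
import Mathlib
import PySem

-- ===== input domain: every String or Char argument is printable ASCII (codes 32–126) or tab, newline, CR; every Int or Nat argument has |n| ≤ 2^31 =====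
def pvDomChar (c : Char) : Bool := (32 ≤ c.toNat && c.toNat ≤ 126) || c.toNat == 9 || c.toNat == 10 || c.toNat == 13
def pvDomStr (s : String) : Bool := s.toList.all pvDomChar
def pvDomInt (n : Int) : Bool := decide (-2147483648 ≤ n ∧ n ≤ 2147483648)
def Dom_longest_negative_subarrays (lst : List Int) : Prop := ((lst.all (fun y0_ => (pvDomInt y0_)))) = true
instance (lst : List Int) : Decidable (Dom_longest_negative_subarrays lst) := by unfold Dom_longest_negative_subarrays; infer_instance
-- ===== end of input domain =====

-- B extracts the maximal negative runs and filters them by maximum length, instead of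
-- A's single-pass index/slice state machine; objective: a more idiomatic decomposition.

-- ===== PORT A =====
-- loop body of A's `for i, num in enumerate(lst)` (slices refer to the whole lst, as in A)
def pvABody (lst : List Int) (st : Int × Int × Int × List (List Int)) (p : Int × Int) :
    Int × Int × Int × List (List Int) :=
  let max_len := st.1; let current_len := st.2.1; let start_idx := st.2.2.1
  let subarrays := st.2.2.2
  let i := p.1; let num := p.2
  if num < 0 then
    let start_idx := if current_len == 0 then i else start_idx
    (max_len, current_len + 1, start_idx, subarrays)
  else
    if current_len > 0 then
      if current_len > max_len then
        (current_len, 0, start_idx,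
          [PySem.List.slice lst (some start_idx) (some (start_idx + current_len))])
      else if current_len == max_len then
        (max_len, 0, start_idx,
          subarrays ++ [PySem.List.slice lst (some start_idx) (some (start_idx + current_len))])
      else (max_len, 0, start_idx, subarrays)
    else (max_len, 0, start_idx, subarrays)

-- the trailing `if current_len > 0: …` after A's loop
def pvAFin (lst : List Int) (st : Int × Int × Int × List (List Int)) : List (List Int) :=
  let max_len := st.1; let current_len := st.2.1; let start_idx := st.2.2.1
  let subarrays := st.2.2.2
  if current_len > 0 then
    if current_len > max_len then
      [PySem.List.slice lst (some start_idx) (some (start_idx + current_len))]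
    else if current_len == max_len then
      subarrays ++ [PySem.List.slice lst (some start_idx) (some (start_idx + current_len))]
    else subarrays
  else subarrays

def longest_negative_subarrays (lst : List Int) : List (List Int) :=
  pvAFin lst ((PySem.List.enumerate lst 0).foldl (pvABody lst) (0, 0, -1, []))

-- ===== PORT B =====
-- the outer while-loop of B: collect the maximal runs of consecutive negatives
def pvNegRuns : List Int → List (List Int)
  | [] => []
  | x :: xs =>
    if x < 0 then (x :: xs.takeWhile (· < 0)) :: pvNegRuns (xs.dropWhile (· < 0))
    else pvNegRuns xs
termination_by l => l.length
decreasing_by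
  · simpa using Nat.lt_succ_of_le (xs.length_dropWhile_le (· < 0))
  · simp

def longest_negative_subarrays_alt (lst : List Int) : List (List Int) :=
  let runs := pvNegRuns lst
  let m := runs.foldl (fun a r => max a r.length) 0
  runs.filter (fun r => r.length == m)

-- ===== PRECONDITION & SPEC =====
def Spec_longest_negative_subarrays (lst : List Int) (out : List (List Int)) : Prop := out = longest_negative_subarrays_alt lst
instance (lst : List Int) (out : List (List Int)) : Decidable (Spec_longest_negative_subarrays lst out) := by unfold Spec_longest_negative_subarrays; infer_instance

-- ===== CLAIM (what is proved, stated in full; the proofs are below) =====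
def Claim_equal_longest_negative_subarrays : Prop := ∀ (lst : List Int), Dom_longest_negative_subarrays lst → Spec_longest_negative_subarrays lst (longest_negative_subarrays lst)

-- ===== LEMMAS AND PROOFS =====

-- flush of a completed run `r` into A's (max_len, subarrays) accumulator
def pvStep (st : Int × List (List Int)) (r : List Int) : Int × List (List Int) :=
  if (r.length : Int) > st.1 then ((r.length : Int), [r])
  else if ((r.length : Int) == st.1) then (st.1, st.2 ++ [r])
  else st

-- slice-free restatement of A's loop: carry the current run explicitly
def pvAltAux (m : Int) (subs : List (List Int)) (cur : List Int) : List Int → List (List Int)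
  | [] => if cur.isEmpty then subs else (pvStep (m, subs) cur).2
  | x :: xs =>
    if x < 0 then pvAltAux m subs (cur ++ [x]) xs
    else if cur.isEmpty then pvAltAux m subs [] xs
    else pvAltAux (pvStep (m, subs) cur).1 (pvStep (m, subs) cur).2 [] xs

-- runs of cur ++ l, where cur is an open (possibly empty) run of negatives
def pvRunsFrom (cur : List Int) : List Int → List (List Int)
  | [] => if cur.isEmpty then [] else [cur]
  | x :: xs =>
    if x < 0 then pvRunsFrom (cur ++ [x]) xs
    else if cur.isEmpty then pvRunsFrom [] xs
    else cur :: pvRunsFrom [] xs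

def pvMaxLen (rs : List (List Int)) : Nat := rs.foldl (fun a r => max a r.length) 0

theorem pvA_loop_eq (lst : List Int) :
    ∀ (l : List Int) (i : Nat) (m s : Int) (cur : List Int) (subs : List (List Int)),
      lst.drop i = l →
      (cur ≠ [] → cur.length ≤ i ∧ s = (i : Int) - cur.length ∧
        (lst.drop (i - cur.length)).take cur.length = cur) →
      pvAFin lst ((PySem.List.enumerate l i).foldl (pvABody lst)
        (m, (cur.length : Int), s, subs)) = pvAltAux m subs cur l := by
  intro l
  induction l with
  | nil =>
    intro i m s cur subs hdrop hinv
    by_cases hc : cur = []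
    · subst hc; simp [PySem.List.enumerate, pvAFin, pvAltAux]
    · obtain ⟨hle, hs, hsl⟩ := hinv hc
      have hcl : 0 < cur.length := List.length_pos_iff.mpr hc
      have hslice : PySem.List.slice lst (some s) (some (s + (cur.length : Int))) = cur := by
        rw [PySem.List.slice_toNat lst (by omega) (by omega)]
        have h1 : (s.toNat) = i - cur.length := by omega
        have h2 : ((s + (cur.length : Int)).toNat - s.toNat) = cur.length := by omega
        rw [h2, h1, hsl]
      simp only [PySem.List.enumerate, List.foldl_nil, pvAFin, pvAltAux, pvStep]
      simp only [hslice]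
      have : ¬ cur.isEmpty = true := by simp [List.isEmpty_iff, hc]
      simp only [this]
      split_ifs with h1 h2 h3 h4 h5 h6 <;> simp_all
  | cons x xs ih =>
    intro i m s cur subs hdrop hinv
    have hxi : lst[i]? = some x := by
      have h0 := List.getElem?_drop (xs := lst) (i := i) (j := 0)
      rw [hdrop] at h0; simpa using h0.symm
    have hdrop' : lst.drop (i + 1) = xs := by
      rw [← List.drop_drop, hdrop]; simp
    rw [PySem.List.enumerate_cons, List.foldl_cons]
    by_cases hx : x < 0
    · by_cases hc : cur = []
      · subst hc
        have hbody : pvABody lst (m, ((0 : Nat) : Int), s, subs) ((i : Int), x)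
            = (m, (([x] : List Int).length : Int), (i : Int), subs) := by
          simp [pvABody, hx]
        simp only [List.length_nil] at hbody ⊢
        have ihx := ih (i + 1) m (i : Int) [x] subs hdrop' ?_
        · rw [Nat.cast_add, Nat.cast_one] at ihx
          rw [hbody, ihx]
          simp [pvAltAux, hx]
        · intro _
          refine ⟨by simp, by simp, ?_⟩
          simp only [List.length_cons, List.length_nil]
          have h9 : i + 1 - 1 = i := by omega
          rw [h9, hdrop]
          simp
      · obtain ⟨hle, hs, hsl⟩ := hinv hc
        have hcl : 0 < cur.length := List.length_pos_iff.mpr hc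
        have hbody : pvABody lst (m, (cur.length : Int), s, subs) ((i : Int), x)
            = (m, ((cur ++ [x]).length : Int), s, subs) := by
          simp only [pvABody, hx, if_true]
          have h8 : ¬ ((cur.length : Int) == 0) = true := by simp; omega
          simp [h8]
        have ihx := ih (i + 1) m s (cur ++ [x]) subs hdrop' ?_
        · rw [Nat.cast_add, Nat.cast_one] at ihx
          rw [hbody, ihx]
          simp [pvAltAux, hx]
        · intro _
          refine ⟨by simp only [List.length_append, List.length_cons, List.length_nil]; omega,
            by simp only [List.length_append, List.length_cons, List.length_nil]; push_cast; omega, ?_⟩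
          have harith : i + 1 - (cur ++ [x]).length = i - cur.length := by
            simp only [List.length_append, List.length_cons, List.length_nil]; omega
          rw [harith]
          have : (lst.drop (i - cur.length)).take (cur.length + 1)
              = (lst.drop (i - cur.length)).take cur.length
                ++ ((lst.drop (i - cur.length))[cur.length]?).toList := List.take_add_one
          have hget : (lst.drop (i - cur.length))[cur.length]? = some x := by
            rw [List.getElem?_drop]
            have : i - cur.length + cur.length = i := by omega
            rw [this, hxi]
          simp only [List.length_append, List.length_cons, List.length_nil]
          rw [this, hget, hsl]
          simp
    · by_cases hc : cur = []
      · subst hc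
        have hbody : pvABody lst (m, ((0 : Nat) : Int), s, subs) ((i : Int), x)
            = (m, (([] : List Int).length : Int), s, subs) := by
          simp [pvABody, hx]
        simp only [List.length_nil] at hbody ⊢
        have ihx := ih (i + 1) m s [] subs hdrop' (by simp)
        rw [Nat.cast_add, Nat.cast_one] at ihx
        simp only [List.length_nil] at ihx
        rw [hbody, ihx]
        simp [pvAltAux, hx]
      · obtain ⟨hle, hs, hsl⟩ := hinv hc
        have hcl : 0 < cur.length := List.length_pos_iff.mpr hc
        have hslice : PySem.List.slice lst (some s) (some (s + (cur.length : Int))) = cur := by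
          rw [PySem.List.slice_toNat lst (by omega) (by omega)]
          have h1 : (s.toNat) = i - cur.length := by omega
          have h2 : ((s + (cur.length : Int)).toNat - s.toNat) = cur.length := by omega
          rw [h2, h1, hsl]
        have hbody : pvABody lst (m, (cur.length : Int), s, subs) ((i : Int), x)
            = ((pvStep (m, subs) cur).1, ((0 : Nat) : Int), s, (pvStep (m, subs) cur).2) := by
          simp only [pvABody, hx, if_false, pvStep, hslice]
          have hpos : ((cur.length : Int) > 0) := by omega
          simp only [hpos, if_true]
          split_ifs <;> simp_all
        have ihx := ih (i + 1) (pvStep (m, subs) cur).1 s [] (pvStep (m, subs) cur).2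
          hdrop' (by simp)
        rw [Nat.cast_add, Nat.cast_one] at ihx
        simp only [List.length_nil] at ihx
        rw [hbody, ihx]
        have : ¬ cur.isEmpty = true := by simp [List.isEmpty_iff, hc]
        simp [pvAltAux, hx, this]

theorem pvAltAux_eq_foldl :
    ∀ (l : List Int) (m : Int) (subs : List (List Int)) (cur : List Int),
      pvAltAux m subs cur l = (List.foldl pvStep (m, subs) (pvRunsFrom cur l)).2 := by
  intro l
  induction l with
  | nil =>
    intro m subs cur
    by_cases hc : cur.isEmpty <;> simp [pvAltAux, pvRunsFrom, hc]
  | cons x xs ih =>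
    intro m subs cur
    by_cases hx : x < 0
    · simp [pvAltAux, pvRunsFrom, hx, ih]
    · by_cases hc : cur.isEmpty <;> simp [pvAltAux, pvRunsFrom, hx, hc, ih]

theorem pvRunsFrom_spec :
    ∀ (l : List Int) (cur : List Int),
      pvRunsFrom cur l = if cur.isEmpty then pvNegRuns l
        else (cur ++ l.takeWhile (· < 0)) :: pvNegRuns (l.dropWhile (· < 0)) := by
  intro l
  induction l with
  | nil =>
    intro cur
    by_cases hc : cur.isEmpty <;> simp [pvRunsFrom, pvNegRuns, hc]
  | cons x xs ih =>
    intro cur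
    by_cases hx : x < 0
    · rw [pvRunsFrom, if_pos (by simpa using hx), ih (cur ++ [x])]
      have hne : ¬ (cur ++ [x]).isEmpty := by simp
      rw [if_neg hne]
      by_cases hc : cur.isEmpty
      · have : cur = [] := List.isEmpty_iff.mp hc
        subst this
        rw [if_pos (by rfl), pvNegRuns, if_pos hx]
        simp [hx]
      · rw [if_neg hc]
        simp [hx]
    · rw [pvRunsFrom, if_neg (by simpa using hx)]
      have hnr : pvNegRuns (x :: xs) = pvNegRuns xs := by rw [pvNegRuns, if_neg hx]
      by_cases hc : cur.isEmpty
      · rw [if_pos hc, if_pos hc, ih [], if_pos (by rfl), hnr]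
      · rw [if_neg hc, if_neg hc, ih [], if_pos (by rfl)]
        simp [hx, hnr]

theorem pvFoldlMax_mono :
    ∀ (l : List (List Int)) (a : Nat), a ≤ l.foldl (fun a t => max a t.length) a := by
  intro l
  induction l with
  | nil => simp
  | cons t ts ih =>
    intro a
    simp only [List.foldl_cons]
    exact le_trans (le_max_left _ _) (ih _)

theorem pvMaxLen_ge (rs : List (List Int)) (r : List Int) (hr : r ∈ rs) :
    r.length ≤ pvMaxLen rs := by
  unfold pvMaxLen
  suffices h : ∀ (l : List (List Int)) (a : Nat), r ∈ l →
      r.length ≤ l.foldl (fun a t => max a t.length) a from h rs 0 hr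
  intro l
  induction l with
  | nil => intro a h; cases h
  | cons t ts ih =>
    intro a h
    rcases List.mem_cons.mp h with h | h
    · subst h
      simp only [List.foldl_cons]
      exact le_trans (le_max_right _ _) (pvFoldlMax_mono ts _)
    · exact ih _ h

theorem pvFoldl_step_eq (rs : List (List Int)) :
    List.foldl pvStep ((0 : Int), ([] : List (List Int))) rs
      = ((pvMaxLen rs : Int), rs.filter (fun r => r.length == pvMaxLen rs)) := by
  induction rs using List.reverseRecOn with
  | nil => simp [pvMaxLen]
  | append_singleton rs r ih =>
    have hM : pvMaxLen (rs ++ [r]) = max (pvMaxLen rs) r.length := by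
      simp [pvMaxLen]
    rw [List.foldl_append, ih]
    simp only [List.foldl_cons, List.foldl_nil]
    unfold pvStep
    by_cases h1 : (pvMaxLen rs : Nat) < r.length
    · have hgt : ((r.length : Int) > (pvMaxLen rs : Int)) := by exact_mod_cast h1
      rw [if_pos hgt]
      have hfilt : rs.filter (fun t => t.length == r.length) = [] := by
        rw [List.filter_eq_nil_iff]
        intro t ht
        have := pvMaxLen_ge rs t ht
        simp only [beq_iff_eq]
        omega
      have hM' : pvMaxLen (rs ++ [r]) = r.length := by omega
      rw [hM', List.filter_append, hfilt]
      simp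
    · have hM' : pvMaxLen (rs ++ [r]) = pvMaxLen rs := by omega
      have hngt : ¬ ((r.length : Int) > (pvMaxLen rs : Int)) := by
        omega
      rw [if_neg hngt, hM', List.filter_append]
      by_cases h2 : r.length = pvMaxLen rs
      · have : (((r.length : Int) == (pvMaxLen rs : Int))) = true := by
          simp [h2]
        rw [if_pos this]
        simp [h2]
      · have : ¬ (((r.length : Int) == (pvMaxLen rs : Int))) = true := by
          simp; omega
        rw [if_neg this]
        simp [h2]

theorem longest_negative_subarrays_spec : Claim_equal_longest_negative_subarrays := by
  unfold Claim_equal_longest_negative_subarrays Spec_longest_negative_subarrays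
  intro lst _
  have h1 : longest_negative_subarrays lst = pvAltAux 0 [] [] lst := by
    unfold longest_negative_subarrays
    have := pvA_loop_eq lst lst 0 0 (-1) [] [] (by simp) (by simp)
    simpa using this
  rw [h1, pvAltAux_eq_foldl, pvRunsFrom_spec, if_pos (by rfl), pvFoldl_step_eq]
  rfl
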